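-- pv_equiv track=rewrite | github.com/GitPistachio/Competitive-programming | Contests/Kick Start 2020 - Round D/Locked Doors/Locked Doors_v2.py | nearestNonSmaller
-- ===== SOURCE A (Python) =====
-- from collections import deque
--
-- def nearestNonSmaller(arr):
--     n = len(arr)
--
--     left_right = [[0, 0]]*n
--     stack = deque()
--
--     for i in range(n):
--         while stack and arr[stack[-1]] <= arr[i]:
--             j = stack.pop()
--             if stack:
--                 left_right[j] = (stack[-1], i)
--             else:
--                 left_right[j] = (-1, i)
--                 break
--
--         stack.append(i)
--
--     while stack:
--         j = stack.pop()
--         if stack: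
--             left_right[j] = (stack[-1], -1)
--         else:
--             left_right[j] = (-1, -1)
--             break
--
--     return left_right
-- ===== SOURCE B (Python) =====
-- def nearestNonSmaller(arr):
--     n = len(arr)
--     res = []
--     for i in range(n):
--         li = next((j for j in range(i - 1, -1, -1) if arr[j] > arr[i]), -1)
--         ri = next((j for j in range(i + 1, n) if arr[j] >= arr[i]), -1)
--         res.append((li, ri))
--     return res
-- ===== Notes on version B (the rewrite author's own statement) =====
-- stated objective: simpler
-- what changed: Replaces the single monotonic stack with two phases and in-place index assignments by a direct per-index scan: for each i, scan left for the first strictly greater element and right for the first greater-or-equal element.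
import Mathlib
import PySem

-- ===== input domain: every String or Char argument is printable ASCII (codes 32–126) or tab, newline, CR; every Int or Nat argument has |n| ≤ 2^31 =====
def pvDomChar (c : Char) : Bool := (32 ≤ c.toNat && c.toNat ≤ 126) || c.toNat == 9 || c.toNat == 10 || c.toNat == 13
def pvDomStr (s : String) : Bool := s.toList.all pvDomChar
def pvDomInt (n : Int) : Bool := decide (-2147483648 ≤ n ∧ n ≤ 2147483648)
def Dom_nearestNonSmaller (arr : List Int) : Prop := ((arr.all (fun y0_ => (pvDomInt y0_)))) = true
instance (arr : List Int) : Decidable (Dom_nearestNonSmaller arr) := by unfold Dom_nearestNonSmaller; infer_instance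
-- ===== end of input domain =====

-- B replaces A's single-stack two-phase algorithm by a direct per-index scan (simpler, quadratic, no stack).


-- ===== PORT A =====
-- the inner `while stack and arr[stack[-1]] <= arr[i]` pop loop (with its `break` on empty stack)
def aPop (arr : List Int) (i : Nat) : List Nat → List (Int × Int) → List (Int × Int) × List Nat
  | [], lr => (lr, [])
  | j :: rest, lr =>
    if arr.getD j 0 ≤ arr.getD i 0 then
      match rest with
      | [] => (lr.set j ((-1 : Int), (i : Int)), [])      -- `break` after assigning (-1, i)
      | k :: _ => aPop arr i rest (lr.set j ((k : Int), (i : Int)))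
    else (lr, j :: rest)

-- one iteration of the `for i in range(n)` loop: pop, then `stack.append(i)`
def aStep (arr : List Int) (st : List (Int × Int) × List Nat) (i : Nat) : List (Int × Int) × List Nat :=
  let r := aPop arr i st.2 st.1
  (r.1, i :: r.2)

-- the final `while stack` drain loop
def aFinal : List Nat → List (Int × Int) → List (Int × Int)
  | [], lr => lr
  | j :: rest, lr =>
    match rest with
    | [] => lr.set j ((-1 : Int), (-1 : Int))             -- `break` after assigning (-1, -1)
    | k :: _ => aFinal rest (lr.set j ((k : Int), (-1 : Int)))

def nearestNonSmaller (arr : List Int) : List (Int × Int) :=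
  let n := arr.length
  let st := (List.range n).foldl (aStep arr) (List.replicate n ((0 : Int), (0 : Int)), [])
  aFinal st.2 st.1

-- ===== PORT B =====
-- next((j for j in range(i-1, -1, -1) if arr[j] > arr[i]), -1)
def bLeft (arr : List Int) (i : Nat) : Int :=
  match (List.range i).reverse.find? (fun j => decide (arr.getD i 0 < arr.getD j 0)) with
  | some j => (j : Int)
  | none => -1

-- next((j for j in range(i+1, n) if arr[j] >= arr[i]), -1)
def bRight (arr : List Int) (i : Nat) : Int :=
  match (List.range' (i + 1) (arr.length - (i + 1))).find? (fun j => decide (arr.getD i 0 ≤ arr.getD j 0)) with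
  | some j => (j : Int)
  | none => -1

def nearestNonSmaller_alt (arr : List Int) : List (Int × Int) :=
  (List.range arr.length).map (fun i => (bLeft arr i, bRight arr i))

-- ===== PRECONDITION & SPEC =====
def Spec_nearestNonSmaller (arr : List Int) (out : List (Int × Int)) : Prop := out = nearestNonSmaller_alt arr
instance (arr : List Int) (out : List (Int × Int)) : Decidable (Spec_nearestNonSmaller arr out) := by unfold Spec_nearestNonSmaller; infer_instance

-- ===== CLAIM (what is proved, stated in full; the proofs are below) =====
def Claim_equal_nearestNonSmaller : Prop := ∀ (arr : List Int), Dom_nearestNonSmaller arr → Spec_nearestNonSmaller arr (nearestNonSmaller arr)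

-- ===== LEMMAS AND PROOFS =====
-- nearest-left-strictly-greater / nearest-right-greater-or-equal as find? options
def nlOpt (arr : List Int) (i : Nat) : Option Nat :=
  (List.range i).reverse.find? (fun j => decide (arr.getD i 0 < arr.getD j 0))

def nrOpt (arr : List Int) (i : Nat) : Option Nat :=
  (List.range' (i + 1) (arr.length - (i + 1))).find? (fun j => decide (arr.getD i 0 ≤ arr.getD j 0))

theorem bLeft_def (arr : List Int) (i : Nat) :
    bLeft arr i = match nlOpt arr i with | some j => (j : Int) | none => -1 := rfl

theorem bRight_def (arr : List Int) (i : Nat) :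
    bRight arr i = match nrOpt arr i with | some j => (j : Int) | none => -1 := rfl

theorem findRev_some (p : Nat → Bool) (i k : Nat) :
    ((List.range i).reverse.find? p = some k) ↔
      k < i ∧ p k = true ∧ ∀ m, k < m → m < i → ¬ p m = true := by
  induction i with
  | zero => simp
  | succ n ih =>
    rw [List.range_succ, List.reverse_append]
    simp only [List.reverse_singleton, List.singleton_append]
    by_cases hp : p n = true
    · rw [List.find?_cons_of_pos hp]
      constructor
      · rintro h
        have hk := Option.some.inj h
        subst hk
        exact ⟨Nat.lt_succ_self n, hp, fun m h1 h2 => by omega⟩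
      · rintro ⟨hk, hpk, hmid⟩
        by_cases hkn : k = n
        · simp [hkn]
        · exact absurd hp (hmid n (by omega) (Nat.lt_succ_self n))
    · rw [List.find?_cons_of_neg (by simp [hp]), ih]
      constructor
      · rintro ⟨hk, hpk, hmid⟩
        refine ⟨by omega, hpk, fun m h1 h2 => ?_⟩
        by_cases hmn : m = n
        · subst hmn; exact hp
        · exact hmid m h1 (by omega)
      · rintro ⟨hk, hpk, hmid⟩
        have hkn : k ≠ n := fun h => hp (h ▸ hpk)
        exact ⟨by omega, hpk, fun m h1 h2 => hmid m h1 (by omega)⟩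

theorem findRev_none (p : Nat → Bool) (i : Nat) :
    ((List.range i).reverse.find? p = none) ↔ ∀ m, m < i → ¬ p m = true := by
  rw [List.find?_eq_none]
  constructor
  · intro h m hm; exact h m (by simp [List.mem_reverse, List.mem_range, hm])
  · intro h x hx; exact h x (by simpa [List.mem_reverse, List.mem_range] using hx)

theorem findRange'_some (p : Nat → Bool) (a n k : Nat) :
    ((List.range' a n).find? p = some k) ↔
      a ≤ k ∧ k < a + n ∧ p k = true ∧ ∀ m, a ≤ m → m < k → ¬ p m = true := by
  induction n generalizing a with
  | zero =>
    simp only [List.range'_zero, List.find?_nil]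
    constructor
    · intro h; cases h
    · rintro ⟨h1, h2, -⟩; omega
  | succ n ih =>
    rw [List.range'_succ]
    by_cases hp : p a = true
    · rw [List.find?_cons_of_pos hp]
      constructor
      · rintro h
        have hk := Option.some.inj h
        subst hk
        exact ⟨le_refl a, by omega, hp, fun m h1 h2 => by omega⟩
      · rintro ⟨h1, h2, hpk, hmid⟩
        by_cases hka : k = a
        · simp [hka]
        · exact absurd hp (hmid a (le_refl a) (by omega))
    · rw [List.find?_cons_of_neg (by simp [hp]), ih]
      constructor
      · rintro ⟨h1, h2, hpk, hmid⟩
        refine ⟨by omega, by omega, hpk, fun m hm1 hm2 => ?_⟩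
        by_cases hma : m = a
        · subst hma; exact hp
        · exact hmid m (by omega) hm2
      · rintro ⟨h1, h2, hpk, hmid⟩
        have hka : k ≠ a := fun h => hp (h ▸ hpk)
        exact ⟨by omega, by omega, hpk, fun m hm1 hm2 => hmid m (by omega) hm2⟩

theorem findRange'_none (p : Nat → Bool) (a n : Nat) :
    ((List.range' a n).find? p = none) ↔ ∀ m, a ≤ m → m < a + n → ¬ p m = true := by
  rw [List.find?_eq_none]
  constructor
  · intro h m h1 h2; exact h m (by simp [List.mem_range'_1]; omega)
  · intro h x hx
    have := List.mem_range'_1.mp hx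
    exact h x this.1 this.2

-- the stack invariant: each element's nearest strictly-greater left neighbour is the element below it
def StkChain (arr : List Int) : List Nat → Prop
  | [] => True
  | j :: rest => nlOpt arr j = rest.head? ∧ StkChain arr rest

def MemInv (arr : List Int) (i : Nat) (s : List Nat) : Prop :=
  ∀ j : Nat, j ∈ s ↔ (j < i ∧ ∀ m : Nat, j < m → m < i → arr.getD m 0 < arr.getD j 0)

def LrOk (arr : List Int) (i : Nat) (s : List Nat) (lr : List (Int × Int)) : Prop :=
  ∀ t : Nat, t < arr.length →
    lr[t]? = some (if t < i ∧ t ∉ s then (bLeft arr t, bRight arr t) else ((0 : Int), (0 : Int)))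

theorem nl_some_iff (arr : List Int) (i k : Nat) :
    nlOpt arr i = some k ↔
      k < i ∧ arr.getD i 0 < arr.getD k 0 ∧
        ∀ m, k < m → m < i → arr.getD m 0 ≤ arr.getD i 0 := by
  rw [nlOpt, findRev_some]
  simp only [decide_eq_true_eq]
  constructor
  · rintro ⟨h1, h2, h3⟩
    exact ⟨h1, h2, fun m hm1 hm2 => by have := h3 m hm1 hm2; omega⟩
  · rintro ⟨h1, h2, h3⟩
    exact ⟨h1, h2, fun m hm1 hm2 => by have := h3 m hm1 hm2; omega⟩

theorem nl_none_iff (arr : List Int) (i : Nat) :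
    nlOpt arr i = none ↔ ∀ m, m < i → arr.getD m 0 ≤ arr.getD i 0 := by
  rw [nlOpt, findRev_none]
  simp only [decide_eq_true_eq]
  constructor
  · intro h m hm; have := h m hm; omega
  · intro h m hm; have := h m hm; omega

theorem bLeft_eq_of_some (arr : List Int) (i k : Nat) (h : nlOpt arr i = some k) :
    bLeft arr i = (k : Int) := by rw [bLeft_def, h]

theorem bLeft_eq_of_none (arr : List Int) (i : Nat) (h : nlOpt arr i = none) :
    bLeft arr i = -1 := by rw [bLeft_def, h]

theorem bRight_eq_of (arr : List Int) (j i : Nat) (hji : j < i) (hin : i < arr.length)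
    (hge : arr.getD j 0 ≤ arr.getD i 0)
    (hmid : ∀ m, j < m → m < i → arr.getD m 0 < arr.getD j 0) :
    bRight arr j = (i : Int) := by
  rw [bRight_def]
  have h : nrOpt arr j = some i := by
    rw [nrOpt, findRange'_some]
    simp only [decide_eq_true_eq]
    refine ⟨by omega, by omega, hge, fun m hm1 hm2 => ?_⟩
    have := hmid m (by omega) (by omega); omega
  rw [h]

theorem bRight_eq_neg (arr : List Int) (j : Nat)
    (h : ∀ m, j < m → m < arr.length → arr.getD m 0 < arr.getD j 0) :
    bRight arr j = -1 := by
  rw [bRight_def]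
  have hn : nrOpt arr j = none := by
    rw [nrOpt, findRange'_none]
    simp only [decide_eq_true_eq]
    intro m hm1 hm2
    have := h m (by omega) (by omega); omega
  rw [hn]

-- stack is strictly decreasing in index, strictly increasing in value
theorem stk_pairwise (arr : List Int) :
    ∀ s : List Nat, StkChain arr s →
      s.Pairwise (fun a b => b < a ∧ arr.getD a 0 < arr.getD b 0)
  | [], _ => List.Pairwise.nil
  | j :: rest, h => by
    obtain ⟨hlink, htail⟩ := h
    have ih := stk_pairwise arr rest htail
    refine List.pairwise_cons.mpr ⟨?_, ih⟩
    intro x hx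
    match rest, hx with
    | k :: t, hx =>
      have hk : nlOpt arr j = some k := by simpa using hlink
      have hkj := (nl_some_iff arr j k).mp hk
      rcases List.mem_cons.mp hx with h1 | h1
      · subst h1; exact ⟨hkj.1, hkj.2.1⟩
      · have := (List.pairwise_cons.mp ih).1 x h1
        exact ⟨by omega, by linarith [hkj.2.1, this.2]⟩

theorem stk_dropWhile (arr : List Int) (p : Nat → Bool) :
    ∀ s : List Nat, StkChain arr s → StkChain arr (s.dropWhile p)
  | [], _ => trivial
  | j :: rest, h => by
    rw [List.dropWhile_cons]
    split
    · exact stk_dropWhile arr p rest h.2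
    · exact h

theorem dropWhile_head_false (p : Nat → Bool) :
    ∀ (l : List Nat) (k : Nat) (t : List Nat), l.dropWhile p = k :: t → p k = false
  | [], k, t, h => by simp at h
  | j :: rest, k, t, h => by
    rw [List.dropWhile_cons] at h
    by_cases hp : p j = true
    · rw [if_pos hp] at h; exact dropWhile_head_false p rest k t h
    · rw [if_neg hp] at h
      cases h
      simpa using hp

-- climbing lemma: if every stack element above `lo` has value ≤ arr[i], then every
-- index in (lo, i) has value ≤ arr[i]
theorem climb (arr : List Int) (i : Nat) (s : List Nat) (hmem : MemInv arr i s)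
    (lo : Nat) (hs : ∀ x ∈ s, lo ≤ x → arr.getD x 0 ≤ arr.getD i 0) :
    ∀ m, lo ≤ m → m < i → arr.getD m 0 ≤ arr.getD i 0 := by
  have key : ∀ d : Nat, ∀ m, i - m ≤ d → lo ≤ m → m < i → arr.getD m 0 ≤ arr.getD i 0 := by
    intro d
    induction d with
    | zero => intro m h0 _ hmi; omega
    | succ d ih =>
      intro m hd hlo hmi
      by_cases hm : m ∈ s
      · exact hs m hm hlo
      · have hnot := (hmem m).not.mp hm
        push Not at hnot
        obtain ⟨m', hm1, hm2, hm3⟩ := hnot hmi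
        have := ih m' (by omega) (by omega) hm2
        omega
  intro m hlo hmi; exact key (i - m) m (le_refl _) hlo hmi

-- one-step evaluation equations for the pop loop
theorem aPop_single_pos (arr : List Int) (i j : Nat) (lr : List (Int × Int))
    (hp : arr.getD j 0 ≤ arr.getD i 0) :
    aPop arr i [j] lr = (lr.set j ((-1 : Int), (i : Int)), []) := by
  show (if arr.getD j 0 ≤ arr.getD i 0 then (lr.set j ((-1 : Int), (i : Int)), ([] : List Nat))
        else (lr, [j])) = _
  rw [if_pos hp]

theorem aPop_cons2_pos (arr : List Int) (i j k : Nat) (t' : List Nat) (lr : List (Int × Int))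
    (hp : arr.getD j 0 ≤ arr.getD i 0) :
    aPop arr i (j :: k :: t') lr = aPop arr i (k :: t') (lr.set j ((k : Int), (i : Int))) := by
  show (if arr.getD j 0 ≤ arr.getD i 0 then aPop arr i (k :: t') (lr.set j ((k : Int), (i : Int)))
        else (lr, j :: k :: t')) = _
  rw [if_pos hp]

theorem aPop_cons_neg (arr : List Int) (i j : Nat) (rest : List Nat) (lr : List (Int × Int))
    (hp : ¬ arr.getD j 0 ≤ arr.getD i 0) :
    aPop arr i (j :: rest) lr = (lr, j :: rest) := by
  cases rest with
  | nil =>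
    show (if arr.getD j 0 ≤ arr.getD i 0 then (lr.set j ((-1 : Int), (i : Int)), ([] : List Nat))
          else (lr, [j])) = _
    rw [if_neg hp]
  | cons k t' =>
    show (if arr.getD j 0 ≤ arr.getD i 0 then aPop arr i (k :: t') (lr.set j ((k : Int), (i : Int)))
          else (lr, j :: k :: t')) = _
    rw [if_neg hp]

-- the pop loop pops exactly the maximal prefix with arr[j] <= arr[i], assigning each
-- popped index its (bLeft, bRight) value
theorem aPop_spec (arr : List Int) (i : Nat) (hin : i < arr.length) :
    ∀ (s : List Nat) (lr : List (Int × Int)),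
      StkChain arr s →
      (∀ j ∈ s, j < i ∧ ∀ m, j < m → m < i → arr.getD m 0 < arr.getD j 0) →
      lr.length = arr.length →
      (aPop arr i s lr).2 = s.dropWhile (fun j => decide (arr.getD j 0 ≤ arr.getD i 0)) ∧
      (aPop arr i s lr).1.length = arr.length ∧
      ∀ t, t < arr.length →
        (aPop arr i s lr).1[t]? =
          if t ∈ s.takeWhile (fun j => decide (arr.getD j 0 ≤ arr.getD i 0))
          then some (bLeft arr t, bRight arr t) else lr[t]?
  | [], lr, _, _, hlen => ⟨rfl, hlen, fun t ht => by
      simp [show aPop arr i [] lr = (lr, []) from rfl]⟩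
  | j :: rest, lr, hchain, hmem, hlen => by
    have hj := hmem j (List.mem_cons_self ..)
    by_cases hp : arr.getD j 0 ≤ arr.getD i 0
    · have hpt : decide (arr.getD j 0 ≤ arr.getD i 0) = true := by
        simp only [decide_eq_true_eq]; exact hp
      have hbr : bRight arr j = (i : Int) := bRight_eq_of arr j i hj.1 hin hp hj.2
      rw [List.dropWhile_cons_of_pos (p := fun j => decide (arr.getD j 0 ≤ arr.getD i 0))
            (a := j) (l := rest) hpt,
          List.takeWhile_cons_of_pos (p := fun j => decide (arr.getD j 0 ≤ arr.getD i 0))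
            (a := j) (l := rest) hpt]
      match rest with
      | [] =>
        have hbl : bLeft arr j = -1 := bLeft_eq_of_none arr j (by simpa using hchain.1)
        rw [aPop_single_pos arr i j lr hp]
        refine ⟨rfl, by simp [hlen], fun t ht => ?_⟩
        by_cases htj : t = j
        · subst htj
          rw [List.getElem?_set_self (by omega)]
          simp [hbl, hbr]
        · rw [List.getElem?_set_ne (by omega)]
          simp [List.takeWhile_nil, htj]
      | k :: t' =>
        have hbl : bLeft arr j = (k : Int) :=
          bLeft_eq_of_some arr j k (by simpa using hchain.1)
        have hjrest : j ∉ (k :: t') := by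
          intro hc
          have := (List.pairwise_cons.mp (stk_pairwise arr _ hchain)).1 j hc
          omega
        have ih := aPop_spec arr i hin (k :: t') (lr.set j ((k : Int), (i : Int)))
          hchain.2 (fun x hx => hmem x (List.mem_cons_of_mem _ hx))
          (by simp [hlen])
        rw [aPop_cons2_pos arr i j k t' lr hp]
        refine ⟨ih.1, ih.2.1, fun t ht => ?_⟩
        rw [ih.2.2 t ht]
        by_cases htw : t ∈ (k :: t').takeWhile (fun j => decide (arr.getD j 0 ≤ arr.getD i 0))
        · rw [if_pos htw, if_pos (List.mem_cons_of_mem _ htw)]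
        · rw [if_neg htw]
          by_cases htj : t = j
          · subst htj
            rw [if_pos (List.mem_cons_self ..), List.getElem?_set_self (by omega)]
            simp [hbl, hbr]
          · rw [List.getElem?_set_ne (by omega), if_neg (by
              intro hc
              rcases List.mem_cons.mp hc with h1 | h1
              · exact htj h1
              · exact htw h1)]
    · have hpf : ¬ decide (arr.getD j 0 ≤ arr.getD i 0) = true := by
        simp only [decide_eq_true_eq]; exact hp
      rw [List.dropWhile_cons_of_neg (p := fun j => decide (arr.getD j 0 ≤ arr.getD i 0))
            (a := j) (l := rest) hpf,
          List.takeWhile_cons_of_neg (p := fun j => decide (arr.getD j 0 ≤ arr.getD i 0))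
            (a := j) (l := rest) hpf,
          aPop_cons_neg arr i j rest lr hp]
      exact ⟨rfl, hlen, fun t ht => by simp⟩

-- elements surviving the pop have value strictly above arr[i]
theorem surv_gt (arr : List Int) (i : Nat) (s : List Nat) (hchain : StkChain arr s) :
    ∀ x ∈ s.dropWhile (fun j => decide (arr.getD j 0 ≤ arr.getD i 0)),
      arr.getD i 0 < arr.getD x 0 := by
  intro x hx
  rcases hd : s.dropWhile (fun j => decide (arr.getD j 0 ≤ arr.getD i 0)) with _ | ⟨k, t2⟩
  · rw [hd] at hx; cases hx
  · rw [hd] at hx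
    have hkP := dropWhile_head_false _ s k t2 hd
    simp only [decide_eq_false_iff_not, not_le] at hkP
    have hpair : (k :: t2).Pairwise (fun a b => b < a ∧ arr.getD a 0 < arr.getD b 0) :=
      hd ▸ (stk_pairwise arr s hchain).sublist (List.dropWhile_sublist _)
    rcases List.mem_cons.mp hx with h1 | h1
    · subst h1; exact hkP
    · have := (List.pairwise_cons.mp hpair).1 x h1
      omega

-- the new stack top is exactly the nearest strictly-greater left neighbour of i
theorem nl_eq_head (arr : List Int) (i : Nat) (s : List Nat)
    (hchain : StkChain arr s) (hmem : MemInv arr i s) :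
    nlOpt arr i = (s.dropWhile (fun j => decide (arr.getD j 0 ≤ arr.getD i 0))).head? := by
  rcases hd : s.dropWhile (fun j => decide (arr.getD j 0 ≤ arr.getD i 0)) with _ | ⟨k, t2⟩
  · have halltw : ∀ x ∈ s, arr.getD x 0 ≤ arr.getD i 0 := by
      intro x hx
      have hsplit := List.takeWhile_append_dropWhile
        (p := fun j => decide (arr.getD j 0 ≤ arr.getD i 0)) (l := s)
      rw [hd, List.append_nil] at hsplit
      have := List.mem_takeWhile_imp (hsplit ▸ hx)
      simpa using this
    rw [List.head?_nil, nl_none_iff]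
    exact fun m hm => climb arr i s hmem 0 (fun x hx _ => halltw x hx) m (Nat.zero_le m) hm
  · have hk_mem : k ∈ s.dropWhile (fun j => decide (arr.getD j 0 ≤ arr.getD i 0)) := by
      rw [hd]; exact List.mem_cons_self ..
    have hk_s : k ∈ s := (List.dropWhile_sublist _).mem hk_mem
    have hk_i : k < i := ((hmem k).mp hk_s).1
    have hk_gt : arr.getD i 0 < arr.getD k 0 := surv_gt arr i s hchain k hk_mem
    have hpair : (k :: t2).Pairwise (fun a b => b < a ∧ arr.getD a 0 < arr.getD b 0) :=
      hd ▸ (stk_pairwise arr s hchain).sublist (List.dropWhile_sublist _)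
    have hupper : ∀ x ∈ s, k + 1 ≤ x → arr.getD x 0 ≤ arr.getD i 0 := by
      intro x hx hkx
      have hsplit := List.takeWhile_append_dropWhile
        (p := fun j => decide (arr.getD j 0 ≤ arr.getD i 0)) (l := s)
      rw [hd] at hsplit
      rcases List.mem_append.mp (hsplit ▸ hx) with h1 | h1
      · have := List.mem_takeWhile_imp h1
        simpa using this
      · rcases List.mem_cons.mp h1 with h2 | h2
        · omega
        · have := (List.pairwise_cons.mp hpair).1 x h2
          omega
    rw [List.head?_cons, nl_some_iff]
    exact ⟨hk_i, hk_gt, fun m h1 h2 => climb arr i s hmem (k + 1) hupper m (by omega) h2⟩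

-- one iteration of the main loop preserves all three invariants
theorem aStep_inv (arr : List Int) (i : Nat) (hin : i < arr.length)
    (lr : List (Int × Int)) (s : List Nat)
    (hchain : StkChain arr s) (hmem : MemInv arr i s)
    (hlen : lr.length = arr.length) (hlr : LrOk arr i s lr) :
    StkChain arr (aStep arr (lr, s) i).2 ∧ MemInv arr (i + 1) (aStep arr (lr, s) i).2 ∧
      (aStep arr (lr, s) i).1.length = arr.length ∧
      LrOk arr (i + 1) (aStep arr (lr, s) i).2 (aStep arr (lr, s) i).1 := by
  obtain ⟨h2, hlen', h3⟩ :=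
    aPop_spec arr i hin s lr hchain (fun j hj => (hmem j).mp hj) hlen
  have hstep2 : (aStep arr (lr, s) i).2 = i :: (aPop arr i s lr).2 := rfl
  have hstep1 : (aStep arr (lr, s) i).1 = (aPop arr i s lr).1 := rfl
  rw [hstep1, hstep2, h2]
  have hsplit := List.takeWhile_append_dropWhile
    (p := fun j => decide (arr.getD j 0 ≤ arr.getD i 0)) (l := s)
  have hs'_sub : ∀ x ∈ s.dropWhile (fun j => decide (arr.getD j 0 ≤ arr.getD i 0)), x ∈ s :=
    fun x hx => (List.dropWhile_sublist _).mem hx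
  have htw_sub : ∀ x ∈ s.takeWhile (fun j => decide (arr.getD j 0 ≤ arr.getD i 0)), x ∈ s :=
    fun x hx => (List.takeWhile_sublist _).mem hx
  have hdisj : ∀ x ∈ s.takeWhile (fun j => decide (arr.getD j 0 ≤ arr.getD i 0)),
      x ∉ s.dropWhile (fun j => decide (arr.getD j 0 ≤ arr.getD i 0)) := by
    intro x hx hx'
    have hpairs := stk_pairwise arr s hchain
    have := (List.pairwise_append.mp (hsplit ▸ hpairs)).2.2 x hx x hx'
    omega
  have hs'notP := surv_gt arr i s hchain
  refine ⟨⟨nl_eq_head arr i s hchain hmem, stk_dropWhile arr _ s hchain⟩, ?_, hlen', ?_⟩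
  · -- MemInv (i+1)
    intro j
    constructor
    · intro hj
      rcases List.mem_cons.mp hj with h1 | h1
      · subst h1
        exact ⟨by omega, fun m hm1 hm2 => by omega⟩
      · have hold := (hmem j).mp (hs'_sub j h1)
        refine ⟨by omega, fun m hm1 hm2 => ?_⟩
        by_cases hmi : m = i
        · subst hmi; exact hs'notP j h1
        · exact hold.2 m hm1 (by omega)
    · rintro ⟨hji, hmid⟩
      by_cases hji' : j = i
      · subst hji'; exact List.mem_cons_self ..
      · have hjlt : j < i := by omega
        have hj_s : j ∈ s := (hmem j).mpr ⟨hjlt, fun m h1 h2 => hmid m h1 (by omega)⟩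
        have hgi : arr.getD i 0 < arr.getD j 0 := hmid i hjlt (Nat.lt_succ_self i)
        have hjtw : j ∉ s.takeWhile (fun j => decide (arr.getD j 0 ≤ arr.getD i 0)) := by
          intro hc
          have := List.mem_takeWhile_imp hc
          simp only [decide_eq_true_eq] at this
          omega
        refine List.mem_cons_of_mem _ ?_
        rcases List.mem_append.mp (hsplit ▸ hj_s) with h1 | h1
        · exact absurd h1 hjtw
        · exact h1
  · -- LrOk (i+1)
    intro t ht
    rw [h3 t ht]
    by_cases htw' : t ∈ s.takeWhile (fun j => decide (arr.getD j 0 ≤ arr.getD i 0))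
    · have ht_i : t < i := ((hmem t).mp (htw_sub t htw')).1
      rw [if_pos htw', if_pos]
      refine ⟨ht_i.trans (Nat.lt_succ_self i), ?_⟩
      intro hc
      rcases List.mem_cons.mp hc with h1 | h1
      · omega
      · exact hdisj t htw' h1
    · rw [if_neg htw', hlr t ht]
      congr 1
      by_cases hcond : t < i ∧ t ∉ s
      · rw [if_pos hcond, if_pos]
        refine ⟨by omega, ?_⟩
        intro hc
        rcases List.mem_cons.mp hc with h1 | h1
        · omega
        · exact hcond.2 (hs'_sub t h1)
      · rw [if_neg hcond, if_neg]
        rintro ⟨hc1, hc2⟩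
        apply hcond
        have htne : t ≠ i := fun h => hc2 (h ▸ List.mem_cons_self ..)
        refine ⟨by omega, ?_⟩
        intro hts
        rcases List.mem_append.mp (hsplit ▸ hts) with h1 | h1
        · exact htw' h1
        · exact hc2 (List.mem_cons_of_mem _ h1)

def foldState (arr : List Int) (i : Nat) : List (Int × Int) × List Nat :=
  (List.range i).foldl (aStep arr) (List.replicate arr.length ((0 : Int), (0 : Int)), [])

theorem fold_inv (arr : List Int) :
    ∀ i, i ≤ arr.length →
      StkChain arr (foldState arr i).2 ∧ MemInv arr i (foldState arr i).2 ∧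
        (foldState arr i).1.length = arr.length ∧
        LrOk arr i (foldState arr i).2 (foldState arr i).1 := by
  intro i
  induction i with
  | zero =>
    intro _
    refine ⟨trivial, fun j => ?_, by simp [foldState], fun t ht => ?_⟩
    · simp [foldState]
    · simp only [foldState, List.range_zero, List.foldl_nil]
      rw [List.getElem?_replicate_of_lt ht]
      simp
  | succ i ih =>
    intro hi
    have hlt : i < arr.length := by omega
    obtain ⟨hc, hm, hl, hk⟩ := ih (by omega)
    have hfs : foldState arr (i + 1) = aStep arr ((foldState arr i).1, (foldState arr i).2) i := by
      rw [foldState, foldState, List.range_succ, List.foldl_append, List.foldl_cons,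
        List.foldl_nil]
    rw [hfs]
    exact aStep_inv arr i hlt (foldState arr i).1 (foldState arr i).2 hc hm hl hk

-- the drain loop assigns every remaining index its (bLeft, bRight) value
theorem aFinal_spec (arr : List Int) :
    ∀ (s : List Nat) (lr : List (Int × Int)),
      StkChain arr s →
      (∀ j ∈ s, j < arr.length ∧ ∀ m, j < m → m < arr.length → arr.getD m 0 < arr.getD j 0) →
      lr.length = arr.length →
      (∀ t, t < arr.length → t ∉ s → lr[t]? = some (bLeft arr t, bRight arr t)) →
      (aFinal s lr).length = arr.length ∧
        ∀ t, t < arr.length → (aFinal s lr)[t]? = some (bLeft arr t, bRight arr t)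
  | [], lr, _, _, hlen, hok => ⟨hlen, fun t ht => hok t ht (by simp)⟩
  | [j], lr, hchain, hmem, hlen, hok => by
    have hj := hmem j (List.mem_cons_self ..)
    have hbl : bLeft arr j = -1 := bLeft_eq_of_none arr j (by simpa using hchain.1)
    have hbr : bRight arr j = -1 := bRight_eq_neg arr j hj.2
    have hfin : aFinal [j] lr = lr.set j ((-1 : Int), (-1 : Int)) := rfl
    rw [hfin]
    refine ⟨by simp [hlen], fun t ht => ?_⟩
    by_cases htj : t = j
    · subst htj
      rw [List.getElem?_set_self (by omega)]
      simp [hbl, hbr]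
    · rw [List.getElem?_set_ne (by omega)]
      exact hok t ht (by simp [htj])
  | j :: k :: t2, lr, hchain, hmem, hlen, hok => by
    have hj := hmem j (List.mem_cons_self ..)
    have hbl : bLeft arr j = (k : Int) := bLeft_eq_of_some arr j k (by simpa using hchain.1)
    have hbr : bRight arr j = -1 := bRight_eq_neg arr j hj.2
    have hfin : aFinal (j :: k :: t2) lr = aFinal (k :: t2) (lr.set j ((k : Int), (-1 : Int))) :=
      rfl
    rw [hfin]
    apply aFinal_spec arr (k :: t2) _ hchain.2
      (fun x hx => hmem x (List.mem_cons_of_mem _ hx)) (by simp [hlen])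
    intro t ht hts
    by_cases htj : t = j
    · subst htj
      rw [List.getElem?_set_self (by omega)]
      simp [hbl, hbr]
    · rw [List.getElem?_set_ne (by omega)]
      exact hok t ht (by
        intro hc
        rcases List.mem_cons.mp hc with h1 | h1
        · exact htj h1
        · exact hts h1)

theorem nns_eq (arr : List Int) : nearestNonSmaller arr = nearestNonSmaller_alt arr := by
  obtain ⟨hc, hm, hl, hk⟩ := fold_inv arr arr.length le_rfl
  have hmain : nearestNonSmaller arr =
      aFinal (foldState arr arr.length).2 (foldState arr arr.length).1 := rfl
  obtain ⟨hflen, hfval⟩ := aFinal_spec arr (foldState arr arr.length).2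
    (foldState arr arr.length).1 hc
    (fun j hj => (hm j).mp hj) hl
    (fun t ht hts => by
      rw [hk t ht, if_pos ⟨ht, hts⟩])
  apply List.ext_getElem?
  intro t
  by_cases ht : t < arr.length
  · rw [hmain, hfval t ht]
    rw [nearestNonSmaller_alt]
    rw [List.getElem?_map, List.getElem?_range ht]
    rfl
  · rw [hmain]
    rw [List.getElem?_eq_none (by omega : (aFinal (foldState arr arr.length).2 (foldState arr arr.length).1).length ≤ t)]
    rw [List.getElem?_eq_none (by simp [nearestNonSmaller_alt]; omega)]

-- ===== VERDICT (by name: the statement is the Claim_ definition above) =====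
theorem nearestNonSmaller_spec : Claim_equal_nearestNonSmaller := by
  intro arr _
  exact nns_eq arr
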